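-- pv_equiv track=rewrite | github.com/cbmckinstry/Pre-Clustering1 | Master.py | compute_ranges
-- ===== SOURCE A (Python) =====
-- def compute_ranges(people):
--     final=[]
--     counter1=0
--     people1=people
--     final1=[]
--     while people1>=0:
--         if people1%6==0:
--             final1.append(counter1+(people1//6))
--         counter1+=1
--         people1-=5
--     counter2=0
--     people2=people
--     final2=[]
--     while people2>=0:
--         if people2%6==0:
--             final2.append(counter2+(people2//6))
--         counter2+=1
--         people2-=7
--     if final1:
--         final.append([min(final1),max(final1)])
--     else:
--         final.append([])
--     if final2:
--         final.append([min(final2),max(final2)])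
--     else:
--         final.append([])
--     return final
-- ===== SOURCE B (Python) =====
-- def compute_ranges(people):
--     # Closed form: in loop 1 the valid steps are k ≡ -people (mod 6), value (people+k)//6 increasing;
--     # in loop 2 the valid steps are k ≡ people (mod 6), value (people-k)//6 decreasing.
--     if people < 0:
--         return [[], []]
--     out = []
--     n5 = people // 5
--     k0 = (-people) % 6
--     if k0 <= n5:
--         kmax = n5 - (n5 - k0) % 6
--         out.append([(people + k0) // 6, (people + kmax) // 6])
--     else:
--         out.append([])
--     n7 = people // 7
--     j0 = people % 6
--     if j0 <= n7:
--         jmax = n7 - (n7 - j0) % 6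
--         out.append([(people - jmax) // 6, (people - j0) // 6])
--     else:
--         out.append([])
--     return out
-- ===== Notes on version B (the rewrite author's own statement) =====
-- stated objective: faster
-- what changed: Replaced both O(n) step-5/step-7 scanning loops by O(1) closed forms: the valid counters form an arithmetic progression mod 6, the appended values are monotone in the counter, so min/max are the values at the first and last valid counter computed by modular arithmetic.
import Mathlib
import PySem

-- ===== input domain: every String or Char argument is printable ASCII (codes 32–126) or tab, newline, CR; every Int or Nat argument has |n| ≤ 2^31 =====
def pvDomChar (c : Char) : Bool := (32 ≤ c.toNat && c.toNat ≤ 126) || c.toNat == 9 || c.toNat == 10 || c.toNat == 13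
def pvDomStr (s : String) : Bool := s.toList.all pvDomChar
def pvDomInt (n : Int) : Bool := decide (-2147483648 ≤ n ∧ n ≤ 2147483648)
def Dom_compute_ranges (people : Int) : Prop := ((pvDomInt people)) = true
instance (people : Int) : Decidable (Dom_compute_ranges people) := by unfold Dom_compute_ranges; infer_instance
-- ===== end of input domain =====

-- B replaces A's two O(n) scanning loops by O(1) modular-arithmetic closed forms for the
-- first/last valid step of each loop (objective: faster, asymptotic).

-- ===== PORT A =====
-- while people1 >= 0: if people1%6==0: final1.append(counter1+people1//6); counter1+=1; people1-=5
def pvLoop1 (c p : Int) : List Int :=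
  if h : 0 ≤ p then
    (if PySem.Int.mod p 6 = 0 then [c + PySem.Int.floordiv p 6] else []) ++ pvLoop1 (c + 1) (p - 5)
  else []
termination_by (p + 5).toNat
decreasing_by omega

-- same loop with step 7
def pvLoop2 (c p : Int) : List Int :=
  if h : 0 ≤ p then
    (if PySem.Int.mod p 6 = 0 then [c + PySem.Int.floordiv p 6] else []) ++ pvLoop2 (c + 1) (p - 7)
  else []
termination_by (p + 7).toNat
decreasing_by omega

-- if finalI: final.append([min(finalI), max(finalI)]) else: final.append([])
def pvMinMax (l : List Int) : List Int :=
  if l.isEmpty then []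
  else [(PySem.List.min? l (fun y => y)).getD 0, (PySem.List.max? l (fun y => y)).getD 0]

def compute_ranges (people : Int) : List (List Int) :=
  let final1 := pvLoop1 0 people
  let final2 := pvLoop2 0 people
  [pvMinMax final1, pvMinMax final2]

-- ===== PORT B =====
def compute_ranges_alt (people : Int) : List (List Int) :=
  if people < 0 then [[], []]
  else
    let n5 := PySem.Int.floordiv people 5
    let k0 := PySem.Int.mod (-people) 6
    let part1 : List Int :=
      if k0 ≤ n5 then
        let kmax := n5 - PySem.Int.mod (n5 - k0) 6
        [PySem.Int.floordiv (people + k0) 6, PySem.Int.floordiv (people + kmax) 6]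
      else []
    let n7 := PySem.Int.floordiv people 7
    let j0 := PySem.Int.mod people 6
    let part2 : List Int :=
      if j0 ≤ n7 then
        let jmax := n7 - PySem.Int.mod (n7 - j0) 6
        [PySem.Int.floordiv (people - jmax) 6, PySem.Int.floordiv (people - j0) 6]
      else []
    [part1, part2]

-- ===== PRECONDITION & SPEC =====
def Spec_compute_ranges (people : Int) (out : List (List Int)) : Prop := out = compute_ranges_alt people
instance (people : Int) (out : List (List Int)) : Decidable (Spec_compute_ranges people out) := by unfold Spec_compute_ranges; infer_instance

-- ===== CLAIM (what is proved, stated in full; the proofs are below) =====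
def Claim_equal_compute_ranges : Prop := ∀ (people : Int), Dom_compute_ranges people → Spec_compute_ranges people (compute_ranges people)

-- ===== LEMMAS AND PROOFS =====

-- arithmetic progression a, a+d, …, a+(n-1)d
def apList (a d : Int) (n : Nat) : List Int := (List.range n).map (fun i : Nat => a + d * (i : Int))

lemma apList_congr (a b d : Int) (n m : Nat) (h1 : a = b) (h2 : n = m) :
    apList a d n = apList b d m := by rw [h1, h2]

lemma apList_cons (a d : Int) (m : Nat) : apList a d (m + 1) = a :: apList (a + d) d m := by
  unfold apList
  rw [List.range_succ_eq_map, List.map_cons, List.map_map]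
  refine congrArg₂ List.cons (by push_cast; ring) ?_
  apply List.map_congr_left
  intro i _
  simp only [Function.comp_apply, Nat.succ_eq_add_one]
  push_cast
  ring

lemma apList_one (a d : Int) : apList a d 1 = [a] := by simp [apList]

lemma apList_snoc (a d : Int) (m : Nat) : apList a d (m + 1) = apList a d m ++ [a + d * m] := by
  simp [apList, List.range_succ]

lemma mem_apList_pos (a : Int) (m : Nat) (y : Int) (hy : y ∈ apList a 1 m) :
    a ≤ y ∧ y ≤ a + m - 1 := by
  simp only [apList, List.mem_map] at hy
  obtain ⟨i, hi, rfl⟩ := hy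
  have := List.mem_range.mp hi
  omega

lemma mem_apList_neg (a : Int) (m : Nat) (y : Int) (hy : y ∈ apList a (-1) m) :
    a - m + 1 ≤ y ∧ y ≤ a := by
  simp only [apList, List.mem_map] at hy
  obtain ⟨i, hi, rfl⟩ := hy
  have := List.mem_range.mp hi
  omega

lemma foldl_min_of_le (x : Int) (t : List Int) (h : ∀ y ∈ t, x ≤ y) : t.foldl min x = x := by
  induction t with
  | nil => rfl
  | cons z t ih =>
      simp only [List.foldl_cons]
      rw [min_eq_left (h z (by simp))]
      exact ih (fun y hy => h y (by simp [hy]))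

lemma foldl_max_of_le (x : Int) (t : List Int) (h : ∀ y ∈ t, y ≤ x) : t.foldl max x = x := by
  induction t with
  | nil => rfl
  | cons z t ih =>
      simp only [List.foldl_cons]
      rw [max_eq_left (h z (by simp))]
      exact ih (fun y hy => h y (by simp [hy]))

lemma foldl_max_le (x z : Int) (t : List Int) (hx : x ≤ z) (h : ∀ y ∈ t, y ≤ z) :
    t.foldl max x ≤ z := by
  induction t generalizing x with
  | nil => exact hx
  | cons w t ih =>
      simp only [List.foldl_cons]
      exact ih (max x w) (max_le hx (h w (by simp))) (fun y hy => h y (by simp [hy]))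

lemma foldl_min_ge (x z : Int) (t : List Int) (hx : z ≤ x) (h : ∀ y ∈ t, z ≤ y) :
    z ≤ t.foldl min x := by
  induction t generalizing x with
  | nil => exact hx
  | cons w t ih =>
      simp only [List.foldl_cons]
      exact ih (min x w) (le_min hx (h w (by simp))) (fun y hy => h y (by simp [hy]))

lemma foldl_max_snoc (x z : Int) (t : List Int) (hx : x ≤ z) (h : ∀ y ∈ t, y ≤ z) :
    (t ++ [z]).foldl max x = z := by
  rw [List.foldl_append]
  simp only [List.foldl_cons, List.foldl_nil]
  exact max_eq_right (foldl_max_le x z t hx h)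

lemma foldl_min_snoc (x z : Int) (t : List Int) (hx : z ≤ x) (h : ∀ y ∈ t, z ≤ y) :
    (t ++ [z]).foldl min x = z := by
  rw [List.foldl_append]
  simp only [List.foldl_cons, List.foldl_nil]
  exact min_eq_right (foldl_min_ge x z t hx h)

lemma pvMinMax_nil : pvMinMax [] = [] := rfl

lemma pvMinMax_cons (a : Int) (t : List Int) :
    pvMinMax (a :: t) = [t.foldl min a, t.foldl max a] := by
  simp [pvMinMax, PySem.List.min?_id_cons, PySem.List.max?_id_cons]

-- min/max of the ascending progression
lemma minmax_apList_pos (a : Int) (m : Nat) :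
    pvMinMax (apList a 1 (m + 1)) = [a, a + m] := by
  rcases m with _ | m
  · simp [apList_one, pvMinMax_cons]
  · rw [apList_cons, apList_snoc, pvMinMax_cons]
    have hmem : ∀ y ∈ apList (a + 1) 1 m, a + 1 ≤ y ∧ y ≤ a + 1 + m - 1 :=
      fun y hy => mem_apList_pos (a + 1) m y hy
    rw [foldl_min_of_le a _ (by
      intro y hy
      rcases List.mem_append.mp hy with h | h
      · have := (hmem y h).1; omega
      · simp at h; omega)]
    rw [foldl_max_snoc a _ _ (by omega) (fun y hy => by have := (hmem y hy).2; omega)]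
    simp only [List.cons.injEq]
    and_intros <;> first | trivial | (push_cast; ring)

-- min/max of the descending progression
lemma minmax_apList_neg (a : Int) (m : Nat) :
    pvMinMax (apList a (-1) (m + 1)) = [a - m, a] := by
  rcases m with _ | m
  · simp [apList_one, pvMinMax_cons]
  · rw [apList_cons, apList_snoc, pvMinMax_cons]
    have hmem : ∀ y ∈ apList (a + -1) (-1) m, a + -1 - m + 1 ≤ y ∧ y ≤ a + -1 :=
      fun y hy => mem_apList_neg (a + -1) m y hy
    rw [foldl_min_snoc a _ _ (by omega) (fun y hy => by have := (hmem y hy).1; omega)]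
    rw [foldl_max_of_le a _ (by
      intro y hy
      rcases List.mem_append.mp hy with h | h
      · have := (hmem y h).2; omega
      · simp at h; omega)]
    simp only [List.cons.injEq]
    and_intros <;> first | trivial | (push_cast; ring)

-- closed form for loop 1: valid counters are k ≡ (-p) mod 6, value (p + k)/6 ascending
def closed1 (c p : Int) : List Int :=
  if 0 ≤ p ∧ (-p) % 6 ≤ p / 5 then
    apList (c + (p + (-p) % 6) / 6) 1 ((p / 5 - (-p) % 6) / 6 + 1).toNat
  else []

-- closed form for loop 2: valid counters are k ≡ p mod 6, value (p - k)/6 descending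
def closed2 (c p : Int) : List Int :=
  if 0 ≤ p ∧ p % 6 ≤ p / 7 then
    apList (c + (p - p % 6) / 6) (-1) ((p / 7 - p % 6) / 6 + 1).toNat
  else []

lemma pvLoop1_eq_closed1 (c p : Int) : pvLoop1 c p = closed1 c p := by
  induction c, p using pvLoop1.induct with
  | case2 c p h =>
      rw [pvLoop1, dif_neg h, closed1, if_neg (by omega)]
  | case1 c p h ih =>
      rw [pvLoop1, dif_pos h, ih]
      simp only [PySem.Int.mod_eq_emod_of_pos (show (0:Int) < 6 by norm_num),
        PySem.Int.floordiv_eq_ediv_of_pos (show (0:Int) < 6 by norm_num)]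
      by_cases h6 : p % 6 = 0
      · rw [if_pos h6]
        have hk0 : (-p) % 6 = 0 := by omega
        by_cases h30 : 30 ≤ p
        · have hc1 : closed1 (c + 1) (p - 5) =
              apList (c + 1 + p / 6) 1 ((p / 5 / 6 - 1) + 1).toNat := by
            rw [closed1, if_pos (by constructor <;> omega)]
            exact apList_congr _ _ _ _ _ (by omega) (by omega)
          rw [hc1, closed1, if_pos (by constructor <;> omega)]
          have hn : ((p / 5 - (-p) % 6) / 6 + 1).toNat = ((p / 5 / 6 - 1) + 1).toNat + 1 := by
            omega
          rw [hn, apList_cons, List.singleton_append]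
          exact congrArg₂ List.cons (by omega) (apList_congr _ _ _ _ _ (by omega) rfl)
        · have hc1 : closed1 (c + 1) (p - 5) = [] := by
            rw [closed1, if_neg]; omega
          rw [hc1, closed1, if_pos (by constructor <;> omega)]
          have hn : ((p / 5 - (-p) % 6) / 6 + 1).toNat = 1 := by omega
          rw [hn, apList_one]
          simp only [List.append_nil, List.cons.injEq, and_true]
          omega
      · rw [if_neg h6]
        simp only [List.nil_append]
        by_cases h5 : 5 ≤ p
        · by_cases hcond : (-p) % 6 ≤ p / 5
          · rw [closed1, if_pos (by constructor <;> omega),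
                closed1, if_pos (by constructor <;> omega)]
            exact apList_congr _ _ _ _ _ (by omega) (by omega)
          · rw [closed1, if_neg (by omega), closed1, if_neg (by omega)]
        · rw [closed1, if_neg (by omega), closed1, if_neg (by omega)]

lemma pvLoop2_eq_closed2 (c p : Int) : pvLoop2 c p = closed2 c p := by
  induction c, p using pvLoop2.induct with
  | case2 c p h =>
      rw [pvLoop2, dif_neg h, closed2, if_neg (by omega)]
  | case1 c p h ih =>
      rw [pvLoop2, dif_pos h, ih]
      simp only [PySem.Int.mod_eq_emod_of_pos (show (0:Int) < 6 by norm_num),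
        PySem.Int.floordiv_eq_ediv_of_pos (show (0:Int) < 6 by norm_num)]
      by_cases h6 : p % 6 = 0
      · rw [if_pos h6]
        by_cases h42 : 42 ≤ p
        · have hc1 : closed2 (c + 1) (p - 7) =
              apList (c + p / 6 + -1) (-1) ((p / 7 / 6 - 1) + 1).toNat := by
            rw [closed2, if_pos (by constructor <;> omega)]
            exact apList_congr _ _ _ _ _ (by omega) (by omega)
          rw [hc1, closed2, if_pos (by constructor <;> omega)]
          have hn : ((p / 7 - p % 6) / 6 + 1).toNat = ((p / 7 / 6 - 1) + 1).toNat + 1 := by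
            omega
          rw [hn, apList_cons, List.singleton_append]
          exact congrArg₂ List.cons (by omega) (apList_congr _ _ _ _ _ (by omega) rfl)
        · have hc1 : closed2 (c + 1) (p - 7) = [] := by
            rw [closed2, if_neg]; omega
          rw [hc1, closed2, if_pos (by constructor <;> omega)]
          have hn : ((p / 7 - p % 6) / 6 + 1).toNat = 1 := by omega
          rw [hn, apList_one]
          simp only [List.append_nil, List.cons.injEq, and_true]
          omega
      · rw [if_neg h6]
        simp only [List.nil_append]
        by_cases h7 : 7 ≤ p
        · by_cases hcond : p % 6 ≤ p / 7
          · rw [closed2, if_pos (by constructor <;> omega),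
                closed2, if_pos (by constructor <;> omega)]
            exact apList_congr _ _ _ _ _ (by omega) (by omega)
          · rw [closed2, if_neg (by omega), closed2, if_neg (by omega)]
        · rw [closed2, if_neg (by omega), closed2, if_neg (by omega)]

-- ===== VERDICT (by name: the statement is the Claim_ definition above) =====
theorem compute_ranges_spec : Claim_equal_compute_ranges := by
  intro people _
  unfold Spec_compute_ranges compute_ranges compute_ranges_alt
  rw [pvLoop1_eq_closed1, pvLoop2_eq_closed2]
  simp only [PySem.Int.mod_eq_emod_of_pos (show (0:Int) < 6 by norm_num),
    PySem.Int.floordiv_eq_ediv_of_pos (show (0:Int) < 5 by norm_num),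
    PySem.Int.floordiv_eq_ediv_of_pos (show (0:Int) < 7 by norm_num),
    PySem.Int.floordiv_eq_ediv_of_pos (show (0:Int) < 6 by norm_num)]
  by_cases hneg : people < 0
  · rw [if_pos hneg, closed1, if_neg (by omega), closed2, if_neg (by omega), pvMinMax_nil]
  · rw [if_neg hneg]
    unfold closed1 closed2
    by_cases h1 : (-people) % 6 ≤ people / 5
    · rw [if_pos (by constructor <;> omega), if_pos h1]
      have hm : ((people / 5 - (-people) % 6) / 6 + 1).toNat
          = ((people / 5 - (-people) % 6) / 6).toNat + 1 := by omega
      rw [hm, minmax_apList_pos]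
      by_cases h2 : people % 6 ≤ people / 7
      · rw [if_pos (by constructor <;> omega), if_pos h2]
        have hm2 : ((people / 7 - people % 6) / 6 + 1).toNat
            = ((people / 7 - people % 6) / 6).toNat + 1 := by omega
        rw [hm2, minmax_apList_neg]
        simp only [List.cons.injEq, and_true]
        and_intros <;> omega
      · rw [if_neg (by omega), if_neg h2, pvMinMax_nil]
        simp only [List.cons.injEq, and_true]
        and_intros <;> first | trivial | omega
    · rw [if_neg (by omega), if_neg h1, pvMinMax_nil]
      by_cases h2 : people % 6 ≤ people / 7
      · rw [if_pos (by constructor <;> omega), if_pos h2]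
        have hm2 : ((people / 7 - people % 6) / 6 + 1).toNat
            = ((people / 7 - people % 6) / 6).toNat + 1 := by omega
        rw [hm2, minmax_apList_neg]
        simp only [List.cons.injEq, and_true]
        and_intros <;> first | trivial | omega
      · rw [if_neg (by omega), if_neg h2, pvMinMax_nil]
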